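-- pv_equiv track=rewrite | github.com/pphyom/UtilityHub | main/tools.py | get_spm_bmc_info
-- ===== SOURCE A (Python) =====
-- def get_spm_bmc_info(part_list: list[str], sub_sn: list[str]) -> dict[str, str]:
--     """ Retrieve the IPMI MAC and Password from the system. """
--     ipmi_info = {"mac": "", "pswd": ""}
--     for part, ssn in zip(part_list, sub_sn):
--         if "MAC-IPMI-ADDRESS" in part:
--             ipmi_info["mac"] = ssn
--         if "NUM-DEFPWD" in part:
--             ipmi_info["pswd"] = ssn
--
--     return ipmi_info
-- ===== SOURCE B (Python) =====
-- def _last_match(marker, pairs):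
--     """ssn of the LAST pair whose part contains marker, else ''."""
--     return next((ssn for part, ssn in reversed(pairs) if marker in part), "")
--
--
-- def get_spm_bmc_info(part_list: list[str], sub_sn: list[str]) -> dict[str, str]:
--     """ Retrieve the IPMI MAC and Password from the system. """
--     pairs = list(zip(part_list, sub_sn))
--     return {
--         "mac": _last_match("MAC-IPMI-ADDRESS", pairs),
--         "pswd": _last_match("NUM-DEFPWD", pairs),
--     }
-- ===== Notes on version B (the rewrite author's own statement) =====
-- stated objective: alternative
-- what changed: Replaces the single forward loop that mutates a two-key dict with two independent reverse scans: a helper returns the ssn of the last pair whose part contains a given marker (default ""), and the dict is built directly from two calls of it.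
import Mathlib
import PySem

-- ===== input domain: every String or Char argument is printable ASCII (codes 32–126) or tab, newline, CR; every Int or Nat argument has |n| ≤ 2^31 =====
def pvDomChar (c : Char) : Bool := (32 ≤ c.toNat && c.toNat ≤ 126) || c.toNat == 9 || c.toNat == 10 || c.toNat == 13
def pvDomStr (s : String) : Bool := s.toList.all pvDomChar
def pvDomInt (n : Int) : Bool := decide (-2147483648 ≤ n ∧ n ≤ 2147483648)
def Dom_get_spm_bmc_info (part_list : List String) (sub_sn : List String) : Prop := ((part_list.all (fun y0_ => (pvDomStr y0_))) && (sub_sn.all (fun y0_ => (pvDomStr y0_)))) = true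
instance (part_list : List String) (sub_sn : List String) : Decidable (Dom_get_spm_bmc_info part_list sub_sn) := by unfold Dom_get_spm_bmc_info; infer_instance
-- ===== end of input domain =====

-- B rebuilds the result dict from two independent reverse scans (last match per marker, default "")
-- instead of A's single forward loop mutating a two-key dict; objective: alternative decomposition.


-- ===== PORT A =====
-- literal port: forward fold over zip, mutating the two-key dict in place
def get_spm_bmc_info (part_list : List String) (sub_sn : List String) : List (String × String) :=
  let ipmi_info : PySem.Dict String String := PySem.Dict.ofList [("mac", ""), ("pswd", "")]
  let final := (part_list.zip sub_sn).foldl (fun d ps =>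
    let d := if PySem.Str.isIn "MAC-IPMI-ADDRESS" ps.1 then d.insert "mac" ps.2 else d
    if PySem.Str.isIn "NUM-DEFPWD" ps.1 then d.insert "pswd" ps.2 else d) ipmi_info
  final.items

-- ===== PORT B =====
-- B helper: ssn of the LAST pair whose part contains marker, else ""
def lastMatch (marker : String) (pairs : List (String × String)) : String :=
  ((pairs.reverse.find? (fun ps => PySem.Str.isIn marker ps.1)).map Prod.snd).getD ""

def get_spm_bmc_info_alt (part_list : List String) (sub_sn : List String) : List (String × String) :=
  let pairs := part_list.zip sub_sn
  [("mac", lastMatch "MAC-IPMI-ADDRESS" pairs), ("pswd", lastMatch "NUM-DEFPWD" pairs)]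

-- ===== PRECONDITION & SPEC =====
def Spec_get_spm_bmc_info (part_list : List String) (sub_sn : List String) (out : List (String × String)) : Prop := out = get_spm_bmc_info_alt part_list sub_sn
instance (part_list : List String) (sub_sn : List String) (out : List (String × String)) : Decidable (Spec_get_spm_bmc_info part_list sub_sn out) := by unfold Spec_get_spm_bmc_info; infer_instance

-- ===== CLAIM (what is proved, stated in full; the proofs are below) =====
def Claim_equal_get_spm_bmc_info : Prop := ∀ (part_list : List String) (sub_sn : List String), Dom_get_spm_bmc_info part_list sub_sn → Spec_get_spm_bmc_info part_list sub_sn (get_spm_bmc_info part_list sub_sn)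

-- ===== LEMMAS AND PROOFS =====

-- last match with a default, used to characterise the fold
def lastD (pred : String × String → Bool) (dflt : String) (l : List (String × String)) : String :=
  match l.reverse.find? pred with
  | some ps => ps.2
  | none => dflt

theorem lastD_cons (pred : String × String → Bool) (dflt : String) (x : String × String)
    (t : List (String × String)) :
    lastD pred dflt (x :: t) = lastD pred (if pred x then x.2 else dflt) t := by
  simp only [lastD, List.reverse_cons, List.find?_append]
  cases h : t.reverse.find? pred with
  | some p => simp
  | none =>
    cases hp : pred x <;> simp [List.find?, hp]

theorem lastMatch_eq_lastD (marker : String) (pairs : List (String × String)) :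
    lastMatch marker pairs = lastD (fun ps => PySem.Str.isIn marker ps.1) "" pairs := by
  simp only [lastMatch, lastD]
  cases h : pairs.reverse.find? (fun ps => PySem.Str.isIn marker ps.1) <;> simp

theorem fold_items (l : List (String × String)) :
    ∀ (d : PySem.Dict String String) (a b : String), d.items = [("mac", a), ("pswd", b)] →
    ((l.foldl (fun d ps =>
        let d := if PySem.Str.isIn "MAC-IPMI-ADDRESS" ps.1 then d.insert "mac" ps.2 else d
        if PySem.Str.isIn "NUM-DEFPWD" ps.1 then d.insert "pswd" ps.2 else d) d).items)
      = [("mac", lastD (fun ps => PySem.Str.isIn "MAC-IPMI-ADDRESS" ps.1) a l),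
         ("pswd", lastD (fun ps => PySem.Str.isIn "NUM-DEFPWD" ps.1) b l)] := by
  induction l with
  | nil => intro d a b h; simpa [lastD] using h
  | cons x t ih =>
    intro d a b h
    have hcm : d.contains "mac" = true := by
      rw [PySem.Dict.contains_eq_decide_mem_keys]
      simp [PySem.Dict.keys, h]
    have hcp : d.contains "pswd" = true := by
      rw [PySem.Dict.contains_eq_decide_mem_keys]
      simp [PySem.Dict.keys, h]
    simp only [List.foldl_cons]
    rw [lastD_cons, lastD_cons]
    cases h1 : PySem.Str.isIn "MAC-IPMI-ADDRESS" x.1 <;>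
      cases h2 : PySem.Str.isIn "NUM-DEFPWD" x.1 <;>
      (refine ih _ _ _ ?_;
       simp [h1, h2, PySem.Dict.items_insert, PySem.Dict.contains_insert, hcm, hcp, h])

-- ===== VERDICT (by name: the statement is the Claim_ definition above) =====
theorem get_spm_bmc_info_spec : Claim_equal_get_spm_bmc_info := by
  intro part_list sub_sn _
  show get_spm_bmc_info part_list sub_sn = get_spm_bmc_info_alt part_list sub_sn
  unfold get_spm_bmc_info get_spm_bmc_info_alt
  rw [fold_items (part_list.zip sub_sn) _ "" "" (by decide)]
  simp [lastMatch_eq_lastD]
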